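-- pv_equiv track=rewrite | github.com/vn6295337/intelligent-model-selector | selector-service/refresh_model_aa_mapping.py | match_provider_slug_to_aa_slug
-- ===== SOURCE A (Python) =====
-- def match_provider_slug_to_aa_slug(provider_slug, inference_provider, aa_slugs):
--     """
--     Attempt to match provider_slug to aa_slug
--
--     Matching strategies:
--     1. Exact match: provider_slug == aa_slug
--     2. Suffix match: aa_slug ends with provider_slug
--     3. Contains match: provider_slug in aa_slug
--     """
--     provider_slug_lower = provider_slug.lower()
--
--     # Strategy 1: Exact match
--     if provider_slug_lower in [slug.lower() for slug in aa_slugs]: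
--         return next(slug for slug in aa_slugs if slug.lower() == provider_slug_lower)
--
--     # Strategy 2: Suffix match (e.g., "llama-3.1-8b-instant" matches "meta-llama-3.1-8b-instant")
--     for aa_slug in aa_slugs:
--         if aa_slug.lower().endswith(provider_slug_lower):
--             return aa_slug
--
--     # Strategy 3: Contains match (e.g., "gpt-4o" in "gpt-4o-2024-05-13")
--     for aa_slug in aa_slugs:
--         if provider_slug_lower in aa_slug.lower():
--             return aa_slug
--
--     return None
-- ===== SOURCE B (Python) =====
-- def match_provider_slug_to_aa_slug(provider_slug, inference_provider, aa_slugs):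
--     pl = provider_slug.lower()
--     exact = None
--     suffix = None
--     contains = None
--     for slug in aa_slugs:
--         low = slug.lower()
--         if exact is None and low == pl:
--             exact = slug
--         if suffix is None and low.endswith(pl):
--             suffix = slug
--         if contains is None and pl in low:
--             contains = slug
--     if exact is not None:
--         return exact
--     if suffix is not None:
--         return suffix
--     return contains
-- ===== Notes on version B (the rewrite author's own statement) =====
-- stated objective: simpler
-- what changed: Replaces A's three priority-ordered scans (and the redundant list-comprehension membership re-scan in strategy 1) with a single pass that records the first exact, first suffix and first contains match in three accumulators, then returns them in priority order.
import Mathlib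
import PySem

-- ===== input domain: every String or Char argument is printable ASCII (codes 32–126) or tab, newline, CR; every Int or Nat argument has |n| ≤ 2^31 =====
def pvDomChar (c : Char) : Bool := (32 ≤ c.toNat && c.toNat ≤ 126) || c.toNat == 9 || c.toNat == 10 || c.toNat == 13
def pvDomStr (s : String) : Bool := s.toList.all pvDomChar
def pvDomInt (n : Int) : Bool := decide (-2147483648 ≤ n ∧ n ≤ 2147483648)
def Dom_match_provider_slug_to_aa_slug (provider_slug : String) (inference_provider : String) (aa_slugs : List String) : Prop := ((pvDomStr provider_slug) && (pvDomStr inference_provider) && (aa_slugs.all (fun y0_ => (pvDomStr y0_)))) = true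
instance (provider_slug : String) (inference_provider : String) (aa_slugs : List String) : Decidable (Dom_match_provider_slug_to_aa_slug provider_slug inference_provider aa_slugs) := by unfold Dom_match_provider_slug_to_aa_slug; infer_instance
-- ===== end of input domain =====

-- B replaces A's three priority-ordered scans (plus the membership re-scan) with one pass
-- holding first-exact / first-suffix / first-contains accumulators (objective: simpler).

-- ===== PORT A =====
-- next(slug for slug in aa_slugs if slug.lower() == provider_slug_lower): first exact match
def pvANext (pl : String) : List String → Option String
  | [] => none
  | slug :: rest =>
    if PySem.Str.lower slug == pl then some slug else pvANext pl rest

-- Strategy 2 for-loop of A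
def pvALoopSuffix (pl : String) : List String → Option String
  | [] => none
  | slug :: rest =>
    if PySem.Str.endswith (PySem.Str.lower slug) pl then some slug else pvALoopSuffix pl rest

-- Strategy 3 for-loop of A
def pvALoopContains (pl : String) : List String → Option String
  | [] => none
  | slug :: rest =>
    if PySem.Str.isIn pl (PySem.Str.lower slug) then some slug else pvALoopContains pl rest

def match_provider_slug_to_aa_slug (provider_slug : String) (inference_provider : String) (aa_slugs : List String) : Option String :=
  let pl := PySem.Str.lower provider_slug
  -- Strategy 1: membership in the lowered list comprehension, then the next(...) re-scan
  if (aa_slugs.map (fun slug => PySem.Str.lower slug)).contains pl then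
    pvANext pl aa_slugs
  else
    match pvALoopSuffix pl aa_slugs with
    | some s => some s
    | none => pvALoopContains pl aa_slugs

-- ===== PORT B =====
def pvBStep (pl : String) (st : Option String × Option String × Option String) (slug : String) : Option String × Option String × Option String :=
  let low := PySem.Str.lower slug
  let e := if st.1.isNone && (low == pl) then some slug else st.1
  let s := if st.2.1.isNone && PySem.Str.endswith low pl then some slug else st.2.1
  let c := if st.2.2.isNone && PySem.Str.isIn pl low then some slug else st.2.2
  (e, s, c)

def match_provider_slug_to_aa_slug_alt (provider_slug : String) (inference_provider : String) (aa_slugs : List String) : Option String :=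
  let pl := PySem.Str.lower provider_slug
  let st := aa_slugs.foldl (pvBStep pl) (none, none, none)
  match st.1 with
  | some e => some e
  | none =>
    match st.2.1 with
    | some s => some s
    | none => st.2.2

-- ===== PRECONDITION & SPEC =====
def Spec_match_provider_slug_to_aa_slug (provider_slug : String) (inference_provider : String) (aa_slugs : List String) (out : Option String) : Prop := out = match_provider_slug_to_aa_slug_alt provider_slug inference_provider aa_slugs
instance (provider_slug : String) (inference_provider : String) (aa_slugs : List String) (out : Option String) : Decidable (Spec_match_provider_slug_to_aa_slug provider_slug inference_provider aa_slugs out) := by unfold Spec_match_provider_slug_to_aa_slug; infer_instance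

-- ===== CLAIM (what is proved, stated in full; the proofs are below) =====
def Claim_equal_match_provider_slug_to_aa_slug : Prop := ∀ (provider_slug : String) (inference_provider : String) (aa_slugs : List String), Dom_match_provider_slug_to_aa_slug provider_slug inference_provider aa_slugs → Spec_match_provider_slug_to_aa_slug provider_slug inference_provider aa_slugs (match_provider_slug_to_aa_slug provider_slug inference_provider aa_slugs)

-- ===== LEMMAS AND PROOFS =====

-- B's fold computes the first match of each of the three predicates (A's three scans).
theorem pvB_fold_char (pl : String) (l : List String) :
    ∀ (e s c : Option String),
      l.foldl (pvBStep pl) (e, s, c) =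
        (e.or (pvANext pl l), s.or (pvALoopSuffix pl l), c.or (pvALoopContains pl l)) := by
  induction l with
  | nil => intro e s c; simp [pvANext, pvALoopSuffix, pvALoopContains]
  | cons h t ih =>
    intro e s c
    simp only [List.foldl_cons]
    rw [show pvBStep pl (e, s, c) h =
      ((if e.isNone && (PySem.Str.lower h == pl) then some h else e),
       (if s.isNone && PySem.Str.endswith (PySem.Str.lower h) pl then some h else s),
       (if c.isNone && PySem.Str.isIn pl (PySem.Str.lower h) then some h else c)) from rfl]
    rw [ih]
    simp only [pvANext, pvALoopSuffix, pvALoopContains]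
    cases e <;> cases s <;> cases c <;>
      cases hb1 : (PySem.Str.lower h == pl) <;>
      cases hb2 : PySem.Str.endswith (PySem.Str.lower h) pl <;>
      cases hb3 : PySem.Str.isIn pl (PySem.Str.lower h) <;>
      simp only [hb1, hb2, hb3, Option.isNone_none, Option.isNone_some, Bool.true_and,
        Bool.false_and, Bool.and_true, Bool.and_false, if_true, if_false, Option.some_or,
        Option.none_or, Option.or_none] <;>
      rfl

-- Python's 'pl in [slug.lower() for slug in l]' membership test succeeds iff the next(...) scan finds a slug.
theorem pvA_contains_iff (pl : String) (l : List String) :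
    (l.map (fun slug => PySem.Str.lower slug)).contains pl = (pvANext pl l).isSome := by
  induction l with
  | nil => rfl
  | cons h t ih =>
    by_cases hh : PySem.Str.lower h = pl
    · have h1 : (pl == PySem.Str.lower h) = true := by simp [hh]
      have h2 : (PySem.Str.lower h == pl) = true := by simp [hh]
      simp only [List.map_cons, List.contains_cons, pvANext, h1, h2, Bool.true_or, if_true]
      rfl
    · have h1 : (pl == PySem.Str.lower h) = false := by
        simp only [beq_eq_false_iff_ne, ne_eq]
        exact fun e => hh e.symm
      have h2 : (PySem.Str.lower h == pl) = false := by
        simp only [beq_eq_false_iff_ne, ne_eq]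
        exact hh
      simp only [List.map_cons, List.contains_cons, pvANext, h1, h2, Bool.false_or, if_false]
      exact ih

-- ===== VERDICT (by name: the statement is the Claim_ definition above) =====
theorem match_provider_slug_to_aa_slug_spec : Claim_equal_match_provider_slug_to_aa_slug := by
  intro provider_slug inference_provider aa_slugs _
  unfold Spec_match_provider_slug_to_aa_slug
  unfold match_provider_slug_to_aa_slug match_provider_slug_to_aa_slug_alt
  simp only [pvB_fold_char, pvA_contains_iff, Option.none_or]
  set pl := PySem.Str.lower provider_slug
  cases hE : pvANext pl aa_slugs with
  | some x => simp [hE]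
  | none => cases hS : pvALoopSuffix pl aa_slugs <;> simp [hE, hS]
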